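-- pv_equiv track=rewrite | github.com/dioptra-io/georesolver | georesolver/evaluation/evaluation_hostname_functions.py | get_hostname_per_org_per_ns
-- ===== SOURCE A (Python) =====
-- from collections import defaultdict
--
-- def get_hostname_per_org_per_ns(
--     hostname_per_name_server: list,
--     main_org_per_hostname: dict,
--     bgp_prefixes_per_hostname: dict,
-- ) -> dict[dict]:
--     """sort hostnames per org per name servers"""
--     hostname_per_org_per_name_servers = defaultdict(dict)
--     for name_server, hostnames in hostname_per_name_server:
--         for hostname in hostnames:
--             try:
--                 main_org = main_org_per_hostname[hostname]
--             except KeyError: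
--                 continue
--
--             len_bgp_prefixes = len(bgp_prefixes_per_hostname[hostname])
--
--             try:
--                 hostname_per_org_per_name_servers[name_server][main_org].append(
--                     (hostname, len_bgp_prefixes)
--                 )
--             except KeyError:
--                 hostname_per_org_per_name_servers[name_server][main_org] = [
--                     (hostname, len_bgp_prefixes)
--                 ]
--
--     # sort
--     for name_server, hostname_per_org in hostname_per_org_per_name_servers.items():
--         for org, hostname_bgp_prefixes in hostname_per_org.items():
--             hostname_per_org_per_name_servers[name_server][org] = sorted(
--                 hostname_bgp_prefixes, key=lambda x: x[-1], reverse=True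
--             )
--
--     return hostname_per_org_per_name_servers
-- ===== SOURCE B (Python) =====
-- from collections import defaultdict
--
--
-- def get_hostname_per_org_per_ns(
--     hostname_per_name_server: list,
--     main_org_per_hostname: dict,
--     bgp_prefixes_per_hostname: dict,
-- ) -> dict[dict]:
--     """sort hostnames per org per name servers"""
--     # one flattening pass: (name_server, org, hostname, prefix count) records,
--     # skipping hostnames with no known org; a missing bgp entry still raises
--     flat = []
--     for name_server, hostnames in hostname_per_name_server:
--         for hostname in hostnames:
--             if hostname in main_org_per_hostname:
--                 flat.append(
--                     (
--                         name_server,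
--                         main_org_per_hostname[hostname],
--                         hostname,
--                         len(bgp_prefixes_per_hostname[hostname]),
--                     )
--                 )
--
--     # first pass fixes the (name server, org) group order (encounter order)
--     result = defaultdict(dict)
--     for name_server, org, _, _ in flat:
--         result[name_server].setdefault(org, [])
--
--     # one global stable sort by prefix count; distributing it fills every
--     # group already sorted (stability keeps the encounter order on ties)
--     for name_server, org, hostname, count in sorted(
--         flat, key=lambda record: record[3], reverse=True
--     ):
--         result[name_server][org].append((hostname, count))
--
--     return result
-- ===== Notes on version B (the rewrite author's own statement) =====
-- stated objective: alternative
-- what changed: Instead of A's build-nested-defaultdicts-then-sort-every-(ns,org)-group loops, B makes one flattening pass into (ns, org, hostname, count) records, does a single global stable sort by count, and distributes the sorted records into a pre-seeded group skeleton, so every group comes out already sorted.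
import Mathlib
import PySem

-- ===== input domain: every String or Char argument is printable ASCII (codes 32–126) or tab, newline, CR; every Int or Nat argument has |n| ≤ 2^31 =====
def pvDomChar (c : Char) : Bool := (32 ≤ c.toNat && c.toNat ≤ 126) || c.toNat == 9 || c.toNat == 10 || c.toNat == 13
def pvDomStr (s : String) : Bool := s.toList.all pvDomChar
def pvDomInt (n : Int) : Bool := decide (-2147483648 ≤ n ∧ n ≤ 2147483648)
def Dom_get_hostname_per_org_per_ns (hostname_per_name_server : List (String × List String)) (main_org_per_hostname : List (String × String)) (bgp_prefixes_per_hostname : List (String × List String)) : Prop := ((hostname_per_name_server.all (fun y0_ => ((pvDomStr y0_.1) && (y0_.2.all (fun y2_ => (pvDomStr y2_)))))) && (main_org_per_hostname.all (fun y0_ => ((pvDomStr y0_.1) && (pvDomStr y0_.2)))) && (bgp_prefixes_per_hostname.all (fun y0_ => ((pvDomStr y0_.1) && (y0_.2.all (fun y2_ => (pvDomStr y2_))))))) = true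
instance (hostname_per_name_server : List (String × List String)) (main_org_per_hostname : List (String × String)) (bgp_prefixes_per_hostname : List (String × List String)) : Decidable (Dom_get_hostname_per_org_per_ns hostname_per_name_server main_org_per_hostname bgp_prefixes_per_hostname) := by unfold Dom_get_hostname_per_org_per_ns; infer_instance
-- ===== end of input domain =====

-- B replaces A's build-nested-dicts-then-sort-each-group loops by one flattening
-- pass, one global stable sort by prefix count, and a distribution pass into
-- pre-seeded groups (objective: alternative decomposition, same result).

-- ===== PORT A =====
-- A appends (hostname, len) to defaultdict d[name_server][main_org] (the
-- try/except-KeyError assignment creates the missing list; defaultdict creates the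
-- missing inner dict): `Dict.modify k dflt f` is exactly that net effect.
-- `len(bgp_prefixes_per_hostname[hostname])` is taken in total form (`getD _ []`):
-- Pre_ excludes exactly the inputs where Python raises KeyError there.
-- The final sort loop reassigns each existing d[ns][org] in place (keys and their
-- order unchanged), i.e. maps sorted(…, key=λx. x[-1], reverse=True) over the items;
-- returning the dict-of-dicts is the items view, per the type convention.
def get_hostname_per_org_per_ns (hostname_per_name_server : List (String × List String)) (main_org_per_hostname : List (String × String)) (bgp_prefixes_per_hostname : List (String × List String)) : List (String × List (String × List (String × Int))) :=
  let d :=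
    hostname_per_name_server.foldl (fun d p =>
      p.2.foldl (fun d hostname =>
        match (PySem.Dict.mk main_org_per_hostname).get? hostname with
        | none => d  -- except KeyError: continue
        | some main_org =>
          let len_bgp_prefixes : Int :=
            PySem.List.len ((PySem.Dict.mk bgp_prefixes_per_hostname).getD hostname [])
          d.modify p.1 PySem.Dict.empty
            (fun inner => inner.modify main_org []
              (fun l => l ++ [(hostname, len_bgp_prefixes)]))) d)
      PySem.Dict.empty
  d.items.map (fun p => (p.1, p.2.items.map (fun q =>
    (q.1, PySem.List.sorted q.2 (fun x => x.2) true))))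

-- ===== PORT B =====
-- Source B: flatten to (ns, org, hostname, count) records (skipping hostnames without
-- an org; the bgp lookup in total form, Pre_ excludes its KeyError), seed the
-- (ns, org) group skeleton in encounter order, then distribute the globally
-- reverse-sorted record list; `result[ns][org].append` on the always-present slot
-- is `Dict.modify` with its default never used.
def get_hostname_per_org_per_ns_alt (hostname_per_name_server : List (String × List String)) (main_org_per_hostname : List (String × String)) (bgp_prefixes_per_hostname : List (String × List String)) : List (String × List (String × List (String × Int))) :=
  let flat : List (String × String × String × Int) :=
    hostname_per_name_server.foldl (fun acc p =>
      p.2.foldl (fun acc hostname =>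
        match (PySem.Dict.mk main_org_per_hostname).get? hostname with
        | none => acc
        | some org => acc ++ [(p.1, org, hostname,
            PySem.List.len ((PySem.Dict.mk bgp_prefixes_per_hostname).getD hostname []))]) acc) []
  let seeded := flat.foldl (fun d e =>
      d.modify e.1 PySem.Dict.empty (fun inner => inner.setdefault e.2.1 [])) PySem.Dict.empty
  let filled := (PySem.List.sorted flat (fun e => e.2.2.2) true).foldl (fun d e =>
      d.modify e.1 PySem.Dict.empty
        (fun inner => inner.modify e.2.1 [] (fun l => l ++ [(e.2.2.1, e.2.2.2)]))) seeded
  filled.items.map (fun p => (p.1, p.2.items))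

-- ===== PRECONDITION & SPEC =====
-- Pre_ excludes exactly the inputs where Python A (and B) raise KeyError: some
-- hostname that has a main org but no bgp_prefixes_per_hostname entry.
def Pre_get_hostname_per_org_per_ns (hostname_per_name_server : List (String × List String)) (main_org_per_hostname : List (String × String)) (bgp_prefixes_per_hostname : List (String × List String)) : Prop :=
  (hostname_per_name_server.all (fun p => p.2.all (fun hostname =>
    !((PySem.Dict.mk main_org_per_hostname).contains hostname)
      || (PySem.Dict.mk bgp_prefixes_per_hostname).contains hostname))) = true
instance (hostname_per_name_server : List (String × List String)) (main_org_per_hostname : List (String × String)) (bgp_prefixes_per_hostname : List (String × List String)) : Decidable (Pre_get_hostname_per_org_per_ns hostname_per_name_server main_org_per_hostname bgp_prefixes_per_hostname) := by unfold Pre_get_hostname_per_org_per_ns; infer_instance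

def pvWitness_get_hostname_per_org_per_ns : (List (String × List String)) × (List (String × String)) × (List (String × List String)) :=
  ([("ns1", ["a", "b", "c"])], [("a", "org1"), ("b", "org2")], [("a", ["p", "q"]), ("b", [])])

def Spec_get_hostname_per_org_per_ns (hostname_per_name_server : List (String × List String)) (main_org_per_hostname : List (String × String)) (bgp_prefixes_per_hostname : List (String × List String)) (out : List (String × List (String × List (String × Int)))) : Prop := out = get_hostname_per_org_per_ns_alt hostname_per_name_server main_org_per_hostname bgp_prefixes_per_hostname
instance (hostname_per_name_server : List (String × List String)) (main_org_per_hostname : List (String × String)) (bgp_prefixes_per_hostname : List (String × List String)) (out : List (String × List (String × List (String × Int)))) : Decidable (Spec_get_hostname_per_org_per_ns hostname_per_name_server main_org_per_hostname bgp_prefixes_per_hostname out) := by unfold Spec_get_hostname_per_org_per_ns; infer_instance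

-- ===== CLAIM (what is proved, stated in full; the proofs are below) =====
def Claim_equal_get_hostname_per_org_per_ns : Prop := ∀ (hostname_per_name_server : List (String × List String)) (main_org_per_hostname : List (String × String)) (bgp_prefixes_per_hostname : List (String × List String)), Dom_get_hostname_per_org_per_ns hostname_per_name_server main_org_per_hostname bgp_prefixes_per_hostname → Pre_get_hostname_per_org_per_ns hostname_per_name_server main_org_per_hostname bgp_prefixes_per_hostname → Spec_get_hostname_per_org_per_ns hostname_per_name_server main_org_per_hostname bgp_prefixes_per_hostname (get_hostname_per_org_per_ns hostname_per_name_server main_org_per_hostname bgp_prefixes_per_hostname)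

-- ===== LEMMAS AND PROOFS =====

-- the flat record list (name_server, org, hostname, prefix count) both ports reduce to
def pvFlat (main_org_per_hostname : List (String × String)) (bgp_prefixes_per_hostname : List (String × List String)) (hostname_per_name_server : List (String × List String)) : List (String × String × String × Int) :=
  hostname_per_name_server.flatMap (fun p => p.2.filterMap (fun h =>
    ((PySem.Dict.mk main_org_per_hostname).get? h).map (fun o =>
      (p.1, o, h, PySem.List.len ((PySem.Dict.mk bgp_prefixes_per_hostname).getD h [])))))

theorem pv_getD_groupFold {κ ν β : Type} [BEq κ] [LawfulBEq κ] [DecidableEq κ]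
    (l : List β) (key : β → κ) (d0 : ν) (f : β → ν → ν) (d : PySem.Dict κ ν) (k : κ) :
    (l.foldl (fun d e => d.modify (key e) d0 (f e)) d).getD k d0
      = (l.filter (fun e => key e == k)).foldl (fun v e => f e v) (d.getD k d0) := by
  induction l generalizing d with
  | nil => rfl
  | cons e t ih =>
      simp only [List.foldl_cons, List.filter_cons, ih]
      by_cases hk : key e = k
      · simp [hk]
      · simp [hk, PySem.Dict.getD_modify, Ne.symm hk]

theorem pv_getD_seedFold {κ β ν : Type} [BEq κ] [LawfulBEq κ] [DecidableEq κ]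
    (l : List β) (key : β → κ) (d : PySem.Dict κ (List ν)) (k : κ) :
    (l.foldl (fun d e => d.setdefault (key e) []) d).getD k []
      = d.getD k [] := by
  induction l generalizing d with
  | nil => rfl
  | cons e t ih =>
      simp only [List.foldl_cons, ih]
      by_cases hk : k = key e
      · rw [hk, PySem.Dict.getD_setdefault_self]
      · rw [PySem.Dict.getD_eq_get?_getD, PySem.Dict.get?_setdefault_of_ne _ _ hk,
          ← PySem.Dict.getD_eq_get?_getD]

theorem pv_keys_seedFold {κ β ν : Type} [BEq κ] [LawfulBEq κ]
    (l : List β) (key : β → κ) (d : PySem.Dict κ (List ν)) :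
    (l.foldl (fun d e => d.setdefault (key e) []) d).keys
      = PySem.Set.update d.keys (l.map key) := by
  induction l generalizing d with
  | nil => rfl
  | cons e t ih =>
      simp only [List.foldl_cons, List.map_cons, ih]
      show _ = PySem.Set.update (PySem.Set.add d.keys (key e)) (t.map key)
      congr 1
      rw [PySem.Dict.keys_setdefault, PySem.Set.add]
      by_cases hc : d.contains (key e) = true
      · rw [if_pos hc, if_pos (by
          simpa [PySem.Set.contains, PySem.Dict.contains_iff_mem_keys] using hc)]
      · rw [if_neg hc, if_neg (by
          simpa [PySem.Set.contains, PySem.Dict.contains_iff_mem_keys] using hc)]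

theorem pv_update_eq_self {α : Type} [BEq α] [LawfulBEq α] (s : PySem.Set α) (l : List α)
    (h : ∀ x ∈ l, x ∈ s) : PySem.Set.update s l = s := by
  induction l generalizing s with
  | nil => rfl
  | cons x t ih =>
      have hx : PySem.Set.contains s x = true := by
        simp [PySem.Set.contains, h x (by simp)]
      show PySem.Set.update (PySem.Set.add s x) t = s
      rw [PySem.Set.add, if_pos hx]
      exact ih s (fun y hy => h y (by simp [hy]))

theorem pv_insertBy_cons {α : Type} (bf : α → α → Bool) (x y : α) (ys : List α) :
    PySem.List.insertBy bf x (y::ys) = if bf x y then x :: y :: ys else y :: PySem.List.insertBy bf x ys := rfl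

theorem pv_insertBy_all_lt {α : Type} (key : α → Int) (x : α) (zs : List α)
    (h : ∀ z ∈ zs, key z < key x) :
    PySem.List.insertBy (fun a b => decide (key b < key a)) x zs = x :: zs := by
  cases zs with
  | nil => simp [PySem.List.insertBy]
  | cons z t => simp [PySem.List.insertBy, h z (by simp)]

theorem pv_pairwise_insertBy {α : Type} (key : α → Int) (x : α) (ys : List α)
    (h : ys.Pairwise (fun a b => key b ≤ key a)) :
    (PySem.List.insertBy (fun a b => decide (key b < key a)) x ys).Pairwise (fun a b => key b ≤ key a) := by
  induction ys with
  | nil => simp [PySem.List.insertBy]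
  | cons y t ih =>
      rw [List.pairwise_cons] at h
      by_cases hb : key y < key x
      · rw [PySem.List.insertBy, if_pos (by simpa using hb)]
        refine List.pairwise_cons.2 ⟨?_, List.pairwise_cons.2 h⟩
        intro z hz
        rcases List.mem_cons.1 hz with rfl | hz
        · exact le_of_lt hb
        · exact le_trans (h.1 z hz) (le_of_lt hb)
      · rw [PySem.List.insertBy, if_neg (by simpa using hb)]
        refine List.pairwise_cons.2 ⟨?_, ih h.2⟩
        intro z hz
        rcases (PySem.List.mem_insertBy _ _ _ _).1 hz with rfl | hz
        · exact le_of_not_gt hb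
        · exact h.1 z hz

theorem pv_filter_insertBy {α : Type} (key : α → Int) (p : α → Bool) (x : α) (ys : List α)
    (h : ys.Pairwise (fun a b => key b ≤ key a)) :
    (PySem.List.insertBy (fun a b => decide (key b < key a)) x ys).filter p
      = if p x then PySem.List.insertBy (fun a b => decide (key b < key a)) x (ys.filter p)
        else ys.filter p := by
  induction ys with
  | nil => simp [PySem.List.insertBy]; cases hp : p x <;> simp [hp, List.filter]
  | cons y t ih =>
      rw [List.pairwise_cons] at h
      by_cases hb : key y < key x
      · rw [PySem.List.insertBy, if_pos (by simpa using hb)]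
        have hall : ∀ z ∈ (y :: t).filter p, key z < key x := by
          intro z hz
          have hm := List.mem_of_mem_filter hz
          rcases List.mem_cons.1 hm with rfl | hm
          · exact hb
          · exact lt_of_le_of_lt (h.1 z hm) hb
        cases hp : p x
        · simp only [List.filter_cons]
          cases hpy : p y <;> simp [hp]
        · rw [if_pos rfl]
          rw [pv_insertBy_all_lt key x _ hall]
          simp [List.filter, hp]
      · rw [PySem.List.insertBy, if_neg (by simpa using hb)]
        simp only [List.filter_cons]
        cases hpy : p y
        · simpa [hpy] using ih h.2
        · rw [ih h.2]
          cases hp : p x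
          · simp
          · simp [pv_insertBy_cons, hb]

theorem pv_filter_sorted_rev {α : Type} (key : α → Int) (p : α → Bool) (xs : List α) :
    (PySem.List.sorted xs key true).filter p = PySem.List.sorted (xs.filter p) key true := by
  rw [PySem.List.sorted_rev_eq_foldl_insertBy, PySem.List.sorted_rev_eq_foldl_insertBy]
  suffices haux : ∀ (acc : List α), acc.Pairwise (fun a b => key b ≤ key a) →
      (xs.foldl (fun acc x => PySem.List.insertBy (fun a b => decide (key b < key a)) x acc) acc).filter p
        = (xs.filter p).foldl (fun acc x => PySem.List.insertBy (fun a b => decide (key b < key a)) x acc) (acc.filter p) by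
    simpa using haux [] (by simp)
  induction xs with
  | nil => intro acc _; rfl
  | cons x t ih =>
      intro acc hacc
      simp only [List.foldl_cons, List.filter_cons]
      rw [ih _ (pv_pairwise_insertBy key x acc hacc),
        pv_filter_insertBy key p x acc hacc]
      cases hp : p x <;> simp

theorem pv_map_insertBy {α β : Type} (f : α → β) (key : β → Int) (x : α) (ys : List α) :
    (PySem.List.insertBy (fun a b => decide (key (f b) < key (f a))) x ys).map f
      = PySem.List.insertBy (fun a b => decide (key b < key a)) (f x) (ys.map f) := by
  induction ys with
  | nil => simp [PySem.List.insertBy]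
  | cons y t ih =>
      by_cases hb : key (f y) < key (f x)
      · rw [PySem.List.insertBy, if_pos (by simpa using hb)]
        simp only [List.map_cons]
        rw [PySem.List.insertBy, if_pos (by simpa using hb)]
      · rw [PySem.List.insertBy, if_neg (by simpa using hb)]
        simp only [List.map_cons]
        rw [PySem.List.insertBy, if_neg (by simpa using hb), ih]

theorem pv_sorted_rev_map {α β : Type} (f : α → β) (key : β → Int) (xs : List α) :
    PySem.List.sorted (xs.map f) key true = (PySem.List.sorted xs (fun a => key (f a)) true).map f := by
  rw [PySem.List.sorted_rev_eq_foldl_insertBy, PySem.List.sorted_rev_eq_foldl_insertBy,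
    List.foldl_map]
  suffices haux : ∀ (acc : List α),
      xs.foldl (fun acc x => PySem.List.insertBy (fun a b => decide (key b < key a)) (f x) acc) (acc.map f)
        = (xs.foldl (fun acc x => PySem.List.insertBy (fun a b => decide (key (f b) < key (f a))) x acc) acc).map f by
    simpa using haux []
  induction xs with
  | nil => intro acc; rfl
  | cons x t ih =>
      intro acc
      simp only [List.foldl_cons]
      rw [← pv_map_insertBy f key x acc, ih]

theorem pv_core (F : List (String × String × String × Int)) :
    ((F.foldl (fun d e => d.modify e.1 PySem.Dict.empty
        (fun inner => inner.modify e.2.1 [] (fun l => l ++ [(e.2.2.1, e.2.2.2)])))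
        PySem.Dict.empty).items.map (fun p => (p.1, p.2.items.map (fun q =>
          (q.1, PySem.List.sorted q.2 (fun x => x.2) true)))))
    = (((PySem.List.sorted F (fun e => e.2.2.2) true).foldl (fun d e => d.modify e.1 PySem.Dict.empty
        (fun inner => inner.modify e.2.1 [] (fun l => l ++ [(e.2.2.1, e.2.2.2)])))
        (F.foldl (fun d e => d.modify e.1 PySem.Dict.empty
          (fun inner => inner.setdefault e.2.1 ([] : List (String × Int))))
        (PySem.Dict.empty : PySem.Dict String (PySem.Dict String (List (String × Int)))))).items.map
        (fun p => (p.1, p.2.items))) := by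
  have hperm : (PySem.List.sorted F (fun e => e.2.2.2) true).Perm F :=
    PySem.List.sorted_perm F _ true
  -- outer key lists and their Nodup
  have hKA : (F.foldl (fun d e => d.modify e.1 PySem.Dict.empty
      (fun inner => inner.modify e.2.1 [] (fun l => l ++ [(e.2.2.1, e.2.2.2)])))
      PySem.Dict.empty).keys = PySem.Set.update [] (F.map (fun e => e.1)) :=
    PySem.Dict.keys_foldl_modify_key F (fun e => e.1) PySem.Dict.empty
      (fun _ e inner => inner.modify e.2.1 [] (fun l => l ++ [(e.2.2.1, e.2.2.2)])) PySem.Dict.empty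
  have hKseed : (F.foldl (fun d e => d.modify e.1 PySem.Dict.empty
      (fun inner => inner.setdefault e.2.1 ([] : List (String × Int))))
        (PySem.Dict.empty : PySem.Dict String (PySem.Dict String (List (String × Int))))).keys
      = PySem.Set.update [] (F.map (fun e => e.1)) :=
    PySem.Dict.keys_foldl_modify_key F (fun e => e.1) PySem.Dict.empty
      (fun _ e inner => inner.setdefault e.2.1 []) PySem.Dict.empty
  have hmemS : ∀ x ∈ (PySem.List.sorted F (fun e => e.2.2.2) true).map (fun e => e.1),
      x ∈ PySem.Set.update ([] : PySem.Set String) (F.map (fun e => e.1)) := by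
    intro x hx
    have hx' : x ∈ F.map (fun e => e.1) := by
      rcases List.mem_map.1 hx with ⟨e, he, rfl⟩
      exact List.mem_map.2 ⟨e, hperm.mem_iff.1 he, rfl⟩
    exact (PySem.Set.mem_ofList _ _).2 hx'
  have hKB0 : ((PySem.List.sorted F (fun e => e.2.2.2) true).foldl (fun d e => d.modify e.1 PySem.Dict.empty
      (fun inner => inner.modify e.2.1 [] (fun l => l ++ [(e.2.2.1, e.2.2.2)])))
      (F.foldl (fun d e => d.modify e.1 PySem.Dict.empty
        (fun inner => inner.setdefault e.2.1 ([] : List (String × Int))))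
        (PySem.Dict.empty : PySem.Dict String (PySem.Dict String (List (String × Int)))))).keys
      = PySem.Set.update (F.foldl (fun d e => d.modify e.1 PySem.Dict.empty
        (fun inner => inner.setdefault e.2.1 ([] : List (String × Int))))
        (PySem.Dict.empty : PySem.Dict String (PySem.Dict String (List (String × Int))))).keys
        ((PySem.List.sorted F (fun e => e.2.2.2) true).map (fun e => e.1)) :=
    PySem.Dict.keys_foldl_modify_key (PySem.List.sorted F (fun e => e.2.2.2) true) (fun e => e.1)
      PySem.Dict.empty
      (fun _ e inner => inner.modify e.2.1 [] (fun l => l ++ [(e.2.2.1, e.2.2.2)])) _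
  have hKB : ((PySem.List.sorted F (fun e => e.2.2.2) true).foldl (fun d e => d.modify e.1 PySem.Dict.empty
      (fun inner => inner.modify e.2.1 [] (fun l => l ++ [(e.2.2.1, e.2.2.2)])))
      (F.foldl (fun d e => d.modify e.1 PySem.Dict.empty
        (fun inner => inner.setdefault e.2.1 ([] : List (String × Int))))
        (PySem.Dict.empty : PySem.Dict String (PySem.Dict String (List (String × Int)))))).keys
      = PySem.Set.update [] (F.map (fun e => e.1)) := by
    rw [hKB0, hKseed]
    exact pv_update_eq_self _ _ hmemS
  have hndA : (F.foldl (fun d e => d.modify e.1 PySem.Dict.empty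
      (fun inner => inner.modify e.2.1 [] (fun l => l ++ [(e.2.2.1, e.2.2.2)])))
      PySem.Dict.empty).keys.Nodup :=
    PySem.Dict.nodup_keys_foldl_modify_key F (fun e => e.1) PySem.Dict.empty
      (fun _ e inner => inner.modify e.2.1 [] (fun l => l ++ [(e.2.2.1, e.2.2.2)]))
      PySem.Dict.empty (by simp [PySem.Dict.keys_empty])
  have hndseed : (F.foldl (fun d e => d.modify e.1 PySem.Dict.empty
      (fun inner => inner.setdefault e.2.1 ([] : List (String × Int))))
      (PySem.Dict.empty : PySem.Dict String (PySem.Dict String (List (String × Int))))).keys.Nodup :=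
    PySem.Dict.nodup_keys_foldl_modify_key F (fun e => e.1) PySem.Dict.empty
      (fun _ e inner => inner.setdefault e.2.1 []) PySem.Dict.empty (by simp [PySem.Dict.keys_empty])
  have hndB : ((PySem.List.sorted F (fun e => e.2.2.2) true).foldl (fun d e => d.modify e.1 PySem.Dict.empty
      (fun inner => inner.modify e.2.1 [] (fun l => l ++ [(e.2.2.1, e.2.2.2)])))
      (F.foldl (fun d e => d.modify e.1 PySem.Dict.empty
        (fun inner => inner.setdefault e.2.1 ([] : List (String × Int))))
        (PySem.Dict.empty : PySem.Dict String (PySem.Dict String (List (String × Int)))))).keys.Nodup :=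
    PySem.Dict.nodup_keys_foldl_modify_key (PySem.List.sorted F (fun e => e.2.2.2) true)
      (fun e => e.1) PySem.Dict.empty
      (fun _ e inner => inner.modify e.2.1 [] (fun l => l ++ [(e.2.2.1, e.2.2.2)])) _ hndseed
  rw [PySem.Dict.items_eq_map_keys _ hndA PySem.Dict.empty,
    PySem.Dict.items_eq_map_keys _ hndB PySem.Dict.empty, hKA, hKB,
    List.map_map, List.map_map]
  apply List.map_congr_left
  intro k hk
  dsimp only [Function.comp]
  refine congrArg (Prod.mk k) ?_
  have hvA : (F.foldl (fun d e => d.modify e.1 PySem.Dict.empty (fun inner => inner.modify e.2.1 [] (fun l => l ++ [(e.2.2.1, e.2.2.2)]))) PySem.Dict.empty).getD k PySem.Dict.empty = ((F.filter (fun e => e.1 == k)).foldl (fun v e => v.modify e.2.1 [] (fun l => l ++ [(e.2.2.1, e.2.2.2)])) (PySem.Dict.empty : PySem.Dict String (List (String × Int)))) :=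
    pv_getD_groupFold F (fun e => e.1) PySem.Dict.empty
      (fun e inner => inner.modify e.2.1 [] (fun l => l ++ [(e.2.2.1, e.2.2.2)])) PySem.Dict.empty k
  have hseedk : (F.foldl (fun d e => d.modify e.1 PySem.Dict.empty (fun inner => inner.setdefault e.2.1 ([] : List (String × Int)))) (PySem.Dict.empty : PySem.Dict String (PySem.Dict String (List (String × Int))))).getD k PySem.Dict.empty = ((F.filter (fun e => e.1 == k)).foldl (fun v e => v.setdefault e.2.1 ([] : List (String × Int))) (PySem.Dict.empty : PySem.Dict String (List (String × Int)))) :=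
    pv_getD_groupFold F (fun e => e.1) PySem.Dict.empty
      (fun e inner => inner.setdefault e.2.1 []) PySem.Dict.empty k
  have hvB : ((PySem.List.sorted F (fun e => e.2.2.2) true).foldl (fun d e => d.modify e.1 PySem.Dict.empty (fun inner => inner.modify e.2.1 [] (fun l => l ++ [(e.2.2.1, e.2.2.2)]))) (F.foldl (fun d e => d.modify e.1 PySem.Dict.empty (fun inner => inner.setdefault e.2.1 ([] : List (String × Int)))) (PySem.Dict.empty : PySem.Dict String (PySem.Dict String (List (String × Int)))))).getD k PySem.Dict.empty = ((PySem.List.sorted F (fun e => e.2.2.2) true).filter (fun e => e.1 == k)).foldl (fun v e => v.modify e.2.1 [] (fun l => l ++ [(e.2.2.1, e.2.2.2)])) ((F.foldl (fun d e => d.modify e.1 PySem.Dict.empty (fun inner => inner.setdefault e.2.1 ([] : List (String × Int)))) (PySem.Dict.empty : PySem.Dict String (PySem.Dict String (List (String × Int))))).getD k PySem.Dict.empty) :=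
    pv_getD_groupFold (PySem.List.sorted F (fun e => e.2.2.2) true) (fun e => e.1) PySem.Dict.empty
      (fun e inner => inner.modify e.2.1 [] (fun l => l ++ [(e.2.2.1, e.2.2.2)])) (F.foldl (fun d e => d.modify e.1 PySem.Dict.empty (fun inner => inner.setdefault e.2.1 ([] : List (String × Int)))) (PySem.Dict.empty : PySem.Dict String (PySem.Dict String (List (String × Int))))) k
  have hSB : ((PySem.List.sorted F (fun e => e.2.2.2) true).filter (fun e => e.1 == k)) = (PySem.List.sorted (F.filter (fun e => e.1 == k)) (fun e => e.2.2.2) true) :=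
    pv_filter_sorted_rev (fun e => e.2.2.2) (fun e => e.1 == k) F
  rw [hvA, hvB, hseedk, hSB]
  -- inner keys
  have hpermI : (PySem.List.sorted (F.filter (fun e => e.1 == k)) (fun e => e.2.2.2) true).Perm (F.filter (fun e => e.1 == k)) := PySem.List.sorted_perm (F.filter (fun e => e.1 == k)) _ true
  have hkA2 : ((F.filter (fun e => e.1 == k)).foldl (fun v e => v.modify e.2.1 [] (fun l => l ++ [(e.2.2.1, e.2.2.2)])) (PySem.Dict.empty : PySem.Dict String (List (String × Int)))).keys = PySem.Set.update [] ((F.filter (fun e => e.1 == k)).map (fun e => e.2.1)) :=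
    PySem.Dict.keys_foldl_modify_key (F.filter (fun e => e.1 == k)) (fun e => e.2.1) []
      (fun _ e l => l ++ [(e.2.2.1, e.2.2.2)]) (PySem.Dict.empty : PySem.Dict String (List (String × Int)))
  have hseedk2 : ((F.filter (fun e => e.1 == k)).foldl (fun v e => v.setdefault e.2.1 ([] : List (String × Int))) (PySem.Dict.empty : PySem.Dict String (List (String × Int)))).keys = PySem.Set.update [] ((F.filter (fun e => e.1 == k)).map (fun e => e.2.1)) :=
    pv_keys_seedFold (F.filter (fun e => e.1 == k)) (fun e => e.2.1) (PySem.Dict.empty : PySem.Dict String (List (String × Int)))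
  have hmemSA : ∀ x ∈ (PySem.List.sorted (F.filter (fun e => e.1 == k)) (fun e => e.2.2.2) true).map (fun e => e.2.1),
      x ∈ PySem.Set.update ([] : PySem.Set String) ((F.filter (fun e => e.1 == k)).map (fun e => e.2.1)) := by
    intro x hx
    have hx' : x ∈ (F.filter (fun e => e.1 == k)).map (fun e => e.2.1) := by
      rcases List.mem_map.1 hx with ⟨e, he, rfl⟩
      exact List.mem_map.2 ⟨e, hpermI.mem_iff.1 he, rfl⟩
    exact (PySem.Set.mem_ofList _ _).2 hx'
  have hkB2 : ((PySem.List.sorted (F.filter (fun e => e.1 == k)) (fun e => e.2.2.2) true).foldl (fun v e => v.modify e.2.1 [] (fun l => l ++ [(e.2.2.1, e.2.2.2)])) ((F.filter (fun e => e.1 == k)).foldl (fun v e => v.setdefault e.2.1 ([] : List (String × Int))) (PySem.Dict.empty : PySem.Dict String (List (String × Int))))).keys = PySem.Set.update [] ((F.filter (fun e => e.1 == k)).map (fun e => e.2.1)) := by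
    rw [PySem.Dict.keys_foldl_modify_key (PySem.List.sorted (F.filter (fun e => e.1 == k)) (fun e => e.2.2.2) true) (fun e => e.2.1) []
      (fun _ e l => l ++ [(e.2.2.1, e.2.2.2)]) ((F.filter (fun e => e.1 == k)).foldl (fun v e => v.setdefault e.2.1 ([] : List (String × Int))) (PySem.Dict.empty : PySem.Dict String (List (String × Int)))), hseedk2]
    exact pv_update_eq_self _ _ hmemSA
  have hndA2 : ((F.filter (fun e => e.1 == k)).foldl (fun v e => v.modify e.2.1 [] (fun l => l ++ [(e.2.2.1, e.2.2.2)])) (PySem.Dict.empty : PySem.Dict String (List (String × Int)))).keys.Nodup :=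
    PySem.Dict.nodup_keys_foldl_modify_key (F.filter (fun e => e.1 == k)) (fun e => e.2.1) []
      (fun _ e l => l ++ [(e.2.2.1, e.2.2.2)]) (PySem.Dict.empty : PySem.Dict String (List (String × Int))) (by simp [PySem.Dict.keys_empty])
  have hndseed2 : ((F.filter (fun e => e.1 == k)).foldl (fun v e => v.setdefault e.2.1 ([] : List (String × Int))) (PySem.Dict.empty : PySem.Dict String (List (String × Int)))).keys.Nodup := by
    rw [hseedk2]
    exact PySem.Set.nodup_ofList ((F.filter (fun e => e.1 == k)).map (fun e => e.2.1))
  have hndB2 : ((PySem.List.sorted (F.filter (fun e => e.1 == k)) (fun e => e.2.2.2) true).foldl (fun v e => v.modify e.2.1 [] (fun l => l ++ [(e.2.2.1, e.2.2.2)])) ((F.filter (fun e => e.1 == k)).foldl (fun v e => v.setdefault e.2.1 ([] : List (String × Int))) (PySem.Dict.empty : PySem.Dict String (List (String × Int))))).keys.Nodup :=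
    PySem.Dict.nodup_keys_foldl_modify_key (PySem.List.sorted (F.filter (fun e => e.1 == k)) (fun e => e.2.2.2) true) (fun e => e.2.1) []
      (fun _ e l => l ++ [(e.2.2.1, e.2.2.2)]) ((F.filter (fun e => e.1 == k)).foldl (fun v e => v.setdefault e.2.1 ([] : List (String × Int))) (PySem.Dict.empty : PySem.Dict String (List (String × Int)))) hndseed2
  rw [PySem.Dict.items_eq_map_keys _ hndA2 [], PySem.Dict.items_eq_map_keys _ hndB2 [],
    hkA2, hkB2, List.map_map]
  apply List.map_congr_left
  intro o ho
  dsimp only [Function.comp]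
  refine congrArg (Prod.mk o) ?_
  have hA3 : ((F.filter (fun e => e.1 == k)).foldl (fun v e => v.modify e.2.1 [] (fun l => l ++ [(e.2.2.1, e.2.2.2)])) (PySem.Dict.empty : PySem.Dict String (List (String × Int)))).getD o [] = ((F.filter (fun e => e.1 == k)).filter (fun e => e.2.1 == o)).foldl (fun v e => v ++ [(e.2.2.1, e.2.2.2)]) [] :=
    pv_getD_groupFold (F.filter (fun e => e.1 == k)) (fun e => e.2.1) []
      (fun e l => l ++ [(e.2.2.1, e.2.2.2)]) (PySem.Dict.empty : PySem.Dict String (List (String × Int))) o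
  have hB3 : ((PySem.List.sorted (F.filter (fun e => e.1 == k)) (fun e => e.2.2.2) true).foldl (fun v e => v.modify e.2.1 [] (fun l => l ++ [(e.2.2.1, e.2.2.2)])) ((F.filter (fun e => e.1 == k)).foldl (fun v e => v.setdefault e.2.1 ([] : List (String × Int))) (PySem.Dict.empty : PySem.Dict String (List (String × Int))))).getD o [] = ((PySem.List.sorted (F.filter (fun e => e.1 == k)) (fun e => e.2.2.2) true).filter (fun e => e.2.1 == o)).foldl
      (fun v e => v ++ [(e.2.2.1, e.2.2.2)]) (((F.filter (fun e => e.1 == k)).foldl (fun v e => v.setdefault e.2.1 ([] : List (String × Int))) (PySem.Dict.empty : PySem.Dict String (List (String × Int)))).getD o []) :=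
    pv_getD_groupFold (PySem.List.sorted (F.filter (fun e => e.1 == k)) (fun e => e.2.2.2) true) (fun e => e.2.1) []
      (fun e l => l ++ [(e.2.2.1, e.2.2.2)]) ((F.filter (fun e => e.1 == k)).foldl (fun v e => v.setdefault e.2.1 ([] : List (String × Int))) (PySem.Dict.empty : PySem.Dict String (List (String × Int)))) o
  have hseed3 : ((F.filter (fun e => e.1 == k)).foldl (fun v e => v.setdefault e.2.1 ([] : List (String × Int))) (PySem.Dict.empty : PySem.Dict String (List (String × Int)))).getD o [] = [] :=
    pv_getD_seedFold (F.filter (fun e => e.1 == k)) (fun e => e.2.1) (PySem.Dict.empty : PySem.Dict String (List (String × Int))) o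
  rw [hA3, hB3, hseed3]
  have hmapA : ((F.filter (fun e => e.1 == k)).filter (fun e => e.2.1 == o)).foldl (fun v e => v ++ [(e.2.2.1, e.2.2.2)]) [] = ((F.filter (fun e => e.1 == k)).filter (fun e => e.2.1 == o)).map (fun e => (e.2.2.1, e.2.2.2)) := by
    simpa using PySem.List.foldl_append_singleton_eq_map (fun e => (e.2.2.1, e.2.2.2)) ((F.filter (fun e => e.1 == k)).filter (fun e => e.2.1 == o)) []
  have hmapB : ((PySem.List.sorted (F.filter (fun e => e.1 == k)) (fun e => e.2.2.2) true).filter (fun e => e.2.1 == o)).foldl (fun v e => v ++ [(e.2.2.1, e.2.2.2)]) []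
      = ((PySem.List.sorted (F.filter (fun e => e.1 == k)) (fun e => e.2.2.2) true).filter (fun e => e.2.1 == o)).map (fun e => (e.2.2.1, e.2.2.2)) := by
    simpa using PySem.List.foldl_append_singleton_eq_map (fun e => (e.2.2.1, e.2.2.2)) ((PySem.List.sorted (F.filter (fun e => e.1 == k)) (fun e => e.2.2.2) true).filter (fun e => e.2.1 == o)) []
  rw [hmapA, hmapB, pv_filter_sorted_rev (fun e => e.2.2.2) (fun e => e.2.1 == o) (F.filter (fun e => e.1 == k))]
  exact pv_sorted_rev_map (fun e => (e.2.2.1, e.2.2.2)) (fun x => x.2) ((F.filter (fun e => e.1 == k)).filter (fun e => e.2.1 == o))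


-- port A in terms of the flat record list
theorem pv_A_shape (hostname_per_name_server : List (String × List String)) (main_org_per_hostname : List (String × String)) (bgp_prefixes_per_hostname : List (String × List String)) :
    get_hostname_per_org_per_ns hostname_per_name_server main_org_per_hostname bgp_prefixes_per_hostname
      = (((pvFlat main_org_per_hostname bgp_prefixes_per_hostname hostname_per_name_server).foldl
          (fun d e => d.modify e.1 PySem.Dict.empty (fun inner => inner.modify e.2.1 [] (fun l => l ++ [(e.2.2.1, e.2.2.2)]))) (PySem.Dict.empty : PySem.Dict String (PySem.Dict String (List (String × Int))))).items.map (fun p => (p.1, p.2.items.map (fun q => (q.1, PySem.List.sorted q.2 (fun x => x.2) true))))) := by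
  unfold get_hostname_per_org_per_ns
  refine congrArg (fun (d : PySem.Dict String (PySem.Dict String (List (String × Int)))) => d.items.map (fun p => (p.1, p.2.items.map (fun q => (q.1, PySem.List.sorted q.2 (fun x => x.2) true))))) ?_
  unfold pvFlat
  generalize (PySem.Dict.empty : PySem.Dict String (PySem.Dict String (List (String × Int)))) = d
  induction hostname_per_name_server generalizing d with
  | nil => simp
  | cons p t ih =>
      simp only [List.foldl_cons, List.flatMap_cons, List.foldl_append]
      rw [ih]
      congr 1
      obtain ⟨ns, hs⟩ := p
      induction hs generalizing d with
      | nil => simp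
      | cons h hs ihh =>
          simp only [List.foldl_cons, List.filterMap_cons]
          cases hL : (PySem.Dict.mk main_org_per_hostname).get? h with
          | none => simpa using ihh d
          | some o =>
              rw [ihh]
              simp

-- port B's flattening loop builds the flat record list
theorem pv_B_flat (hostname_per_name_server : List (String × List String)) (main_org_per_hostname : List (String × String)) (bgp_prefixes_per_hostname : List (String × List String)) (acc : List (String × String × String × Int)) :
    hostname_per_name_server.foldl (fun acc p =>
      p.2.foldl (fun acc h =>
        match (PySem.Dict.mk main_org_per_hostname).get? h with
        | none => acc
        | some o => acc ++ [(p.1, o, h, PySem.List.len ((PySem.Dict.mk bgp_prefixes_per_hostname).getD h []))]) acc) acc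
      = acc ++ pvFlat main_org_per_hostname bgp_prefixes_per_hostname hostname_per_name_server := by
  unfold pvFlat
  induction hostname_per_name_server generalizing acc with
  | nil => simp
  | cons p t ih =>
      simp only [List.foldl_cons, List.flatMap_cons]
      rw [ih]
      have hrow : ∀ (acc₂ : List (String × String × String × Int)),
          p.2.foldl (fun acc h =>
            match (PySem.Dict.mk main_org_per_hostname).get? h with
            | none => acc
            | some o => acc ++ [(p.1, o, h, PySem.List.len ((PySem.Dict.mk bgp_prefixes_per_hostname).getD h []))]) acc₂
          = acc₂ ++ p.2.filterMap (fun h =>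
              ((PySem.Dict.mk main_org_per_hostname).get? h).map (fun o =>
                (p.1, o, h, PySem.List.len ((PySem.Dict.mk bgp_prefixes_per_hostname).getD h [])))) := by
        intro acc₂
        induction p.2 generalizing acc₂ with
        | nil => simp
        | cons h hs ihh =>
            simp only [List.foldl_cons, List.filterMap_cons]
            cases hL : (PySem.Dict.mk main_org_per_hostname).get? h with
            | none => simpa using ihh acc₂
            | some o =>
                rw [ihh]
                simp
      rw [hrow]
      simp

-- port B in terms of the flat record list
theorem pv_B_shape (hostname_per_name_server : List (String × List String)) (main_org_per_hostname : List (String × String)) (bgp_prefixes_per_hostname : List (String × List String)) :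
    get_hostname_per_org_per_ns_alt hostname_per_name_server main_org_per_hostname bgp_prefixes_per_hostname
      = (((PySem.List.sorted (pvFlat main_org_per_hostname bgp_prefixes_per_hostname hostname_per_name_server) (fun e => e.2.2.2) true).foldl
          (fun d e => d.modify e.1 PySem.Dict.empty (fun inner => inner.modify e.2.1 [] (fun l => l ++ [(e.2.2.1, e.2.2.2)])))
          ((pvFlat main_org_per_hostname bgp_prefixes_per_hostname hostname_per_name_server).foldl (fun d e => d.modify e.1 PySem.Dict.empty (fun inner => inner.setdefault e.2.1 ([] : List (String × Int)))) (PySem.Dict.empty : PySem.Dict String (PySem.Dict String (List (String × Int)))))).items.map (fun p => (p.1, p.2.items))) := by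
  unfold get_hostname_per_org_per_ns_alt
  refine congrArg (fun fl => (((PySem.List.sorted fl (fun e : String × String × String × Int => e.2.2.2) true).foldl
      (fun d e => d.modify e.1 PySem.Dict.empty (fun inner => inner.modify e.2.1 [] (fun l => l ++ [(e.2.2.1, e.2.2.2)]))) (fl.foldl (fun d e => d.modify e.1 PySem.Dict.empty (fun inner => inner.setdefault e.2.1 ([] : List (String × Int)))) (PySem.Dict.empty : PySem.Dict String (PySem.Dict String (List (String × Int)))))).items.map (fun p => (p.1, p.2.items)))) ?_
  simpa using pv_B_flat hostname_per_name_server main_org_per_hostname bgp_prefixes_per_hostname []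

-- ===== VERDICT (by name: the statement is the Claim_ definition above) =====
theorem get_hostname_per_org_per_ns_spec : Claim_equal_get_hostname_per_org_per_ns := by
  intro hostname_per_name_server main_org_per_hostname bgp_prefixes_per_hostname _ _
  show get_hostname_per_org_per_ns hostname_per_name_server main_org_per_hostname bgp_prefixes_per_hostname
    = get_hostname_per_org_per_ns_alt hostname_per_name_server main_org_per_hostname bgp_prefixes_per_hostname
  rw [pv_A_shape, pv_B_shape]
  exact pv_core (pvFlat main_org_per_hostname bgp_prefixes_per_hostname hostname_per_name_server)
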